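-- pv_equiv track=rewrite | github.com/Mohammad-Amjed/emad | convert_from.py | make_ordered_tags
-- ===== SOURCE A (Python) =====
-- def make_ordered_tags(input_tag, order_list):
--     #base case
--     if len(order_list) == 1:
--         ordered_tags = []
--         for ord in order_list[0]:
--             new_dict = {str(ord): input_tag[0]}
--             ordered_tags.append(new_dict)
--         return ordered_tags
--
--     #general case
--     ordered_tags = make_ordered_tags(input_tag[1:], order_list[1:])
--     new_ordered_tags = []
--     if len(order_list[0]) > 0:
--         for ord in order_list[0]:
--             if len(ordered_tags) > 0:
--                 for tag in ordered_tags: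
--                     if order_can_be_inserted(ord, tag):
--                         new_dict = {str(ord): input_tag[0]}
--                         new_ordered_tags.append({**tag, **new_dict})
--             else:
--                 return make_ordered_tags([input_tag[0]], [order_list[0]])
--
--     else:
--         return ordered_tags
--
--     return new_ordered_tags
--
-- def order_can_be_inserted(ord, tag):
--     for tg_ord in tag:
--         if int(ord) >= int(tg_ord):
--             return False
--
--     return True
-- ===== SOURCE B (Python) =====
-- def make_ordered_tags(input_tag, order_list):
--     current = []
--     for tag_i, orders in reversed(list(zip(input_tag, order_list))):
--         if not orders:
--             continue
--         if not current:
--             current = [{str(o): tag_i} for o in orders]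
--         else:
--             current = [dict(tag, **{str(o): tag_i}) for o in orders
--                        for tag in current if all(o < int(k) for k in tag)]
--     return current
-- ===== Notes on version B (the rewrite author's own statement) =====
-- stated objective: simpler
-- what changed: Replaces A's head-consuming linear recursion (with two early-return paths) by a single iterative reversed fold over zip(input_tag, order_list), where the empty-accumulator case of the step subsumes both the base case and A's restart-with-base early return.
import Mathlib
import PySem

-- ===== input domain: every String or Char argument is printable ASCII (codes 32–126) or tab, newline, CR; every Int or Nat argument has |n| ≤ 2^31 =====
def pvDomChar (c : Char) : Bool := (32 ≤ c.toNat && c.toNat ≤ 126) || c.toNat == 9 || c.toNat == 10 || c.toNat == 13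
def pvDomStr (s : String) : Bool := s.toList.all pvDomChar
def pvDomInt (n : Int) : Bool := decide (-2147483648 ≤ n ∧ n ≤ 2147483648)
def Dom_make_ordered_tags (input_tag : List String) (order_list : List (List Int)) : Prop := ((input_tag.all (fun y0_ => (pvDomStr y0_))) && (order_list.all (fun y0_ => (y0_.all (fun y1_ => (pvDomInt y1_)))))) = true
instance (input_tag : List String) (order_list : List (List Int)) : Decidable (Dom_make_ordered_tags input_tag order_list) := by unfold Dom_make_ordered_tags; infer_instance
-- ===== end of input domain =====

-- B replaces A's linear recursion (with two early-return quirks) by a single reversed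
-- iteration over zip(input_tag, order_list) folding the tag list right-to-left ('simpler').

-- ===== PORT A =====

-- Python's `{**tag, **{k: v}}` / `dict(tag, **{k: v})`: overwrite in place if k present, else append.
def pyInsertKey (tag : List (String × String)) (k v : String) : List (String × String) :=
  if tag.any (fun kv => kv.1 == k) then tag.map (fun kv => if kv.1 == k then (k, v) else kv)
  else tag ++ [(k, v)]

-- `int(tg_ord)` on keys: keys are always str(int) inside this algorithm, so ofStr? always
-- succeeds there; the `.getD 0` default is never reached on inputs A returns on.
def order_can_be_inserted (o : Int) (tag : List (String × String)) : Bool :=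
  match tag with
  | [] => true
  | kv :: rest =>
    if o ≥ (PySem.Int.ofStr? kv.1).getD 0 then false else order_can_be_inserted o rest

-- Literal port of A's recursion. `order_list = []` loops forever in Python (RecursionError,
-- excluded by Pre_); the port returns [] there to stay total. input_tag[0] is input_tag.headD ""
-- (the IndexError cases are excluded by Pre_).
def make_ordered_tags (input_tag : List String) (order_list : List (List Int)) : List (List (String × String)) :=
  match order_list with
  | [] => []
  | [o0] => o0.map (fun o => [(PySem.Int.toStr o, input_tag.headD "")])
  | o0 :: o1 :: rest =>
    let ordered := make_ordered_tags input_tag.tail (o1 :: rest)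
    if o0.isEmpty then ordered
    else if ordered.isEmpty then
      make_ordered_tags [input_tag.headD ""] [o0]
    else
      o0.flatMap (fun o =>
        ordered.filterMap (fun tag =>
          if order_can_be_inserted o tag then
            some (pyInsertKey tag (PySem.Int.toStr o) (input_tag.headD ""))
          else none))
termination_by order_list.length
decreasing_by all_goals (simp; try omega)

-- ===== PORT B =====
def make_ordered_tags_alt (input_tag : List String) (order_list : List (List Int)) : List (List (String × String)) :=
  ((input_tag.zip order_list).reverse).foldl
    (fun current p =>
      if p.2.isEmpty then current
      else if current.isEmpty then
        p.2.map (fun o => [(PySem.Int.toStr o, p.1)])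
      else
        p.2.flatMap (fun o =>
          (current.filter (fun tag =>
            tag.all (fun kv => decide (o < (PySem.Int.ofStr? kv.1).getD 0)))).map
            (fun tag => pyInsertKey tag (PySem.Int.toStr o) p.1)))
    []

-- ===== PRECONDITION & SPEC =====
-- Pre_ excludes exactly the inputs where A raises: order_list = [] (unbounded recursion,
-- RecursionError) and any nonempty order level at an index input_tag does not reach (IndexError).
def Pre_make_ordered_tags (input_tag : List String) (order_list : List (List Int)) : Prop :=
  order_list ≠ [] ∧ ∀ l ∈ order_list.drop input_tag.length, l = []
instance (input_tag : List String) (order_list : List (List Int)) : Decidable (Pre_make_ordered_tags input_tag order_list) := by unfold Pre_make_ordered_tags; infer_instance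

def pvWitness_make_ordered_tags : List String × List (List Int) := (["a", "b"], [[1, 2], [3]])

def Spec_make_ordered_tags (input_tag : List String) (order_list : List (List Int)) (out : List (List (String × String))) : Prop := out = make_ordered_tags_alt input_tag order_list
instance (input_tag : List String) (order_list : List (List Int)) (out : List (List (String × String))) : Decidable (Spec_make_ordered_tags input_tag order_list out) := by unfold Spec_make_ordered_tags; infer_instance

-- ===== CLAIM (what is proved, stated in full; the proofs are below) =====
def Claim_equal_make_ordered_tags : Prop := ∀ (input_tag : List String) (order_list : List (List Int)), Dom_make_ordered_tags input_tag order_list → Pre_make_ordered_tags input_tag order_list → Spec_make_ordered_tags input_tag order_list (make_ordered_tags input_tag order_list)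

-- ===== LEMMAS AND PROOFS =====

-- A's helper loop equals B's `all(...)` comprehension.
theorem insertable_eq_all (o : Int) (tag : List (String × String)) :
    order_can_be_inserted o tag
      = tag.all (fun kv => decide (o < (PySem.Int.ofStr? kv.1).getD 0)) := by
  induction tag with
  | nil => rfl
  | cons kv rest ih =>
    simp only [order_can_be_inserted, List.all_cons, ih]
    by_cases h : o ≥ (PySem.Int.ofStr? kv.1).getD 0
    · simp [h, not_lt.mpr h]
    · simp [h, lt_of_not_ge h]

-- filterMap with an if-guard is filter-then-map.
theorem filterMap_if_eq_filter_map {α β : Type} (p : α → Bool) (f : α → β) (l : List α) :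
    l.filterMap (fun a => if p a then some (f a) else none) = (l.filter p).map f := by
  induction l with
  | nil => rfl
  | cons a l ih =>
    by_cases h : p a <;> simp [h, ih]

-- B's step on one zip pair.
def altStep (current : List (List (String × String))) (p : String × List Int) :
    List (List (String × String)) :=
  if p.2.isEmpty then current
  else if current.isEmpty then
    p.2.map (fun o => [(PySem.Int.toStr o, p.1)])
  else
    p.2.flatMap (fun o =>
      (current.filter (fun tag =>
        tag.all (fun kv => decide (o < (PySem.Int.ofStr? kv.1).getD 0)))).map
        (fun tag => pyInsertKey tag (PySem.Int.toStr o) p.1))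

theorem alt_nil (order_list : List (List Int)) : make_ordered_tags_alt [] order_list = [] := by
  simp [make_ordered_tags_alt]

theorem alt_cons (t0 : String) (tl : List String) (o0 : List Int) (rest : List (List Int)) :
    make_ordered_tags_alt (t0 :: tl) (o0 :: rest)
      = altStep (make_ordered_tags_alt tl rest) (t0, o0) := by
  simp [make_ordered_tags_alt, altStep, List.foldl_append]

-- A on an all-empty order list (with empty input) returns [].
theorem a_empty_input (order_list : List (List Int))
    (h : ∀ l ∈ order_list, l = []) : make_ordered_tags [] order_list = [] := by
  induction order_list with
  | nil => simp [make_ordered_tags]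
  | cons o0 rest ih =>
    have ho0 : o0 = [] := h o0 (by simp)
    cases rest with
    | nil => simp [make_ordered_tags, ho0]
    | cons o1 rest' =>
      have hrec : make_ordered_tags [] (o1 :: rest') = [] :=
        ih (fun l hl => h l (List.mem_cons_of_mem _ hl))
      simp [make_ordered_tags, ho0, hrec]

theorem main_lemma (order_list : List (List Int)) (input_tag : List String)
    (hpre : ∀ l ∈ order_list.drop input_tag.length, l = []) :
    make_ordered_tags input_tag order_list = make_ordered_tags_alt input_tag order_list := by
  induction order_list generalizing input_tag with
  | nil => simp [make_ordered_tags, make_ordered_tags_alt]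
  | cons o0 rest ih =>
    cases input_tag with
    | nil =>
      have h0 : ∀ l ∈ (o0 :: rest), l = [] := by simpa using hpre
      rw [a_empty_input _ h0, alt_nil]
    | cons t0 tl =>
      have hpre' : ∀ l ∈ rest.drop tl.length, l = [] := by
        intro l hl; exact hpre l (by simpa using hl)
      rw [alt_cons]
      cases rest with
      | nil =>
        have hz : make_ordered_tags_alt tl [] = [] := by simp [make_ordered_tags_alt]
        by_cases ho : o0 = []
        · subst ho; simp [make_ordered_tags, altStep, hz]
        · simp [make_ordered_tags, altStep, hz, ho]
      | cons o1 rest' =>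
        have ihr := ih tl hpre'
        simp only [make_ordered_tags, List.tail_cons, List.headD_cons]
        rw [ihr]
        set cur := make_ordered_tags_alt tl (o1 :: rest') with hcur
        by_cases ho : o0.isEmpty
        · simp [altStep, ho]
        · by_cases hc : cur.isEmpty
          · simp [altStep, ho, hc]
          · simp only [altStep, ho, hc, if_neg, Bool.false_eq_true, not_false_eq_true]
            congr 1
            funext o
            rw [filterMap_if_eq_filter_map]
            congr 1
            apply List.filter_congr
            intro tag _
            exact insertable_eq_all o tag

-- ===== VERDICT (by name: the statement is the Claim_ definition above) =====
theorem make_ordered_tags_spec : Claim_equal_make_ordered_tags := by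
  intro input_tag order_list _ hpre
  exact main_lemma order_list input_tag hpre.2
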